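-- pv_equiv track=rewrite | github.com/aiak-47/SQL-Qry-Analyzer | main.py | generate_high_level_summary
-- ===== SOURCE A (Python) =====
-- def generate_high_level_summary(differences):
--     numeric_count = sum(1 for diff in differences if 'Numeric Differences' in diff)-1
--     bool_count = sum(1 for diff in differences if 'Boolean Differences' in diff)-1
--     string_count = sum(1 for diff in differences if 'String Differences' in diff)
--     datetime_count = sum(1 for diff in differences if 'Datetime Differences' in diff)-1
--
--     return (
--         f'High-Level Summary:\n'
--         f'- Numeric Differences: {numeric_count}\n'
--         f'- Boolean Differences: {bool_count}\n'
--         f'- String Differences: {string_count}\n'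
--         f'- Datetime Differences: {datetime_count}'
--     )
-- ===== SOURCE B (Python) =====
-- def generate_high_level_summary(differences):
--     n = b = s = d = 0
--     for diff in differences:
--         if 'Numeric Differences' in diff:
--             n += 1
--         if 'Boolean Differences' in diff:
--             b += 1
--         if 'String Differences' in diff:
--             s += 1
--         if 'Datetime Differences' in diff:
--             d += 1
--     return (
--         'High-Level Summary:\n'
--         f'- Numeric Differences: {n - 1}\n'
--         f'- Boolean Differences: {b - 1}\n'
--         f'- String Differences: {s}\n'
--         f'- Datetime Differences: {d - 1}'
--     )
-- ===== Notes on version B (the rewrite author's own statement) =====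
-- stated objective: alternative
-- what changed: Replaces four independent generator-expression scans of the list with one loop maintaining four running counters, applying the asymmetric -1 offsets only at formatting time.
import Mathlib
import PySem

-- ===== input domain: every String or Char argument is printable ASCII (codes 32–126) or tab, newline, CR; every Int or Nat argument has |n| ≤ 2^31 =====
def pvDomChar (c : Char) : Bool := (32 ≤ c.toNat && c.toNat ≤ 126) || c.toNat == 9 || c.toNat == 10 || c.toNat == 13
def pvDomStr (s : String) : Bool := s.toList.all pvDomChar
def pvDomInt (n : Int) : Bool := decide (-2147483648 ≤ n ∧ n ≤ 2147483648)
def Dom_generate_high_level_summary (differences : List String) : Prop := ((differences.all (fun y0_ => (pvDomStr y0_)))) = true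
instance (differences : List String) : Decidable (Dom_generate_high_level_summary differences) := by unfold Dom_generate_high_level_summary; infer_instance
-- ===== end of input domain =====

-- ===== PORT A =====
-- B traverses the list once with four running counters instead of A's four separate scans; same return value.
def generate_high_level_summary (differences : List String) : String :=
  let numeric_count : Int :=
    (differences.map (fun diff => if PySem.Str.isIn "Numeric Differences" diff then (1 : Int) else 0)).sum - 1
  let bool_count : Int :=
    (differences.map (fun diff => if PySem.Str.isIn "Boolean Differences" diff then (1 : Int) else 0)).sum - 1
  let string_count : Int :=
    (differences.map (fun diff => if PySem.Str.isIn "String Differences" diff then (1 : Int) else 0)).sum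
  let datetime_count : Int :=
    (differences.map (fun diff => if PySem.Str.isIn "Datetime Differences" diff then (1 : Int) else 0)).sum - 1
  "High-Level Summary:\n- Numeric Differences: " ++ PySem.Int.toStr numeric_count ++
  "\n- Boolean Differences: " ++ PySem.Int.toStr bool_count ++
  "\n- String Differences: " ++ PySem.Int.toStr string_count ++
  "\n- Datetime Differences: " ++ PySem.Int.toStr datetime_count

-- ===== PORT B =====
def ghls_step (acc : Int × Int × Int × Int) (diff : String) : Int × Int × Int × Int :=
  (acc.1 + (if PySem.Str.isIn "Numeric Differences" diff then 1 else 0),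
   acc.2.1 + (if PySem.Str.isIn "Boolean Differences" diff then 1 else 0),
   acc.2.2.1 + (if PySem.Str.isIn "String Differences" diff then 1 else 0),
   acc.2.2.2 + (if PySem.Str.isIn "Datetime Differences" diff then 1 else 0))

def generate_high_level_summary_alt (differences : List String) : String :=
  let c := differences.foldl ghls_step (0, 0, 0, 0)
  "High-Level Summary:\n- Numeric Differences: " ++ PySem.Int.toStr (c.1 - 1) ++
  "\n- Boolean Differences: " ++ PySem.Int.toStr (c.2.1 - 1) ++
  "\n- String Differences: " ++ PySem.Int.toStr c.2.2.1 ++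
  "\n- Datetime Differences: " ++ PySem.Int.toStr (c.2.2.2 - 1)

-- ===== PRECONDITION & SPEC =====
def Spec_generate_high_level_summary (differences : List String) (out : String) : Prop := out = generate_high_level_summary_alt differences
instance (differences : List String) (out : String) : Decidable (Spec_generate_high_level_summary differences out) := by unfold Spec_generate_high_level_summary; infer_instance

-- ===== CLAIM (what is proved, stated in full; the proofs are below) =====
def Claim_equal_generate_high_level_summary : Prop := ∀ (differences : List String), Dom_generate_high_level_summary differences → Spec_generate_high_level_summary differences (generate_high_level_summary differences)

-- ===== LEMMAS AND PROOFS =====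
theorem ghls_foldl_eq (differences : List String) (a b c d : Int) :
    differences.foldl ghls_step (a, b, c, d) =
      (a + (differences.map (fun diff => if PySem.Str.isIn "Numeric Differences" diff then (1 : Int) else 0)).sum,
       b + (differences.map (fun diff => if PySem.Str.isIn "Boolean Differences" diff then (1 : Int) else 0)).sum,
       c + (differences.map (fun diff => if PySem.Str.isIn "String Differences" diff then (1 : Int) else 0)).sum,
       d + (differences.map (fun diff => if PySem.Str.isIn "Datetime Differences" diff then (1 : Int) else 0)).sum) := by
  induction differences generalizing a b c d with
  | nil => simp
  | cons x xs ih => simp [ghls_step, ih]; refine ⟨by ring, by ring, by ring, by ring⟩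

-- ===== VERDICT (by name: the statement is the Claim_ definition above) =====
theorem generate_high_level_summary_spec : Claim_equal_generate_high_level_summary := by
  intro differences _
  unfold Spec_generate_high_level_summary generate_high_level_summary generate_high_level_summary_alt
  rw [ghls_foldl_eq]
  simp
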